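-- pv_equiv track=rewrite | github.com/Hriishikeshh/LP1-Practicals | Macroprocessor/pass1/code.py | macro_Pass1
-- ===== SOURCE A (Python) =====
-- def macro_Pass1(inputlines):
--     mnt=[]
--     mdt=[]
--     kpdt=[]
--     pntab={}
--     ic=[]
--
--     Macroname=None
--     mdtp=1
--     kpdtp=0
--     paramNo=1
--     pp=0
--     kp=0
--     flag=0
--
--     for line in inputlines:
--         line=line.strip()
--         parts=line.split()
--         if parts[0].upper()=="MACRO":
--             flag=1
--             continue
--         elif flag==1:
--             Macroname=parts[0]
--             pp=kp=paramNo=1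
--             pntab[Macroname]=[]
--             if(len(parts)>1):
--                 for i in range(1,len(parts)):
--                     param=parts[i].replace("&","").replace(",","")
--                     if "=" in param:
--                         kp+=1
--                         keyword_param=param.split("=")
--                         pntab[Macroname].append(keyword_param[0])
--                         kpdt.append((keyword_param[0],keyword_param[1] if len(keyword_param)>1 else "-"))
--                     else:
--                         pntab[Macroname].append(param)
--                         pp+=1
--             mnt.append((Macroname,pp,kp,mdtp,kpdtp if kp==0 else kpdtp+1))
--             kpdtp+=kp
--             flag=2
--         elif flag==2:
--             if parts[0].upper()=="MEND":
--                 mdt.append("MEND")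
--                 flag=0
--             else:
--                 mdt_line=[]
--                 for part in parts:
--                     if "&" in part:
--                         part=part.replace("&","").replace(",","")
--                         mdt_line.append(f"(P,{pntab[Macroname].index(part)+1})")
--                     else:
--                         mdt_line.append(part)
--                 mdt.append(" ".join(mdt_line))
--                 mdtp+1
--         else:
--             ic.append(line)
--     return mdt,mnt,kpdt,pntab,ic
-- ===== SOURCE B (Python) =====
-- def _clean(tok):
--     return tok.replace("&", "").replace(",", "")
--
--
-- def _segment(lines):
--     """Phase 1: cut the stripped lines into plain code lines and macro blocks."""
--     segs = []
--     i, n = 0, len(lines)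
--     while i < n:
--         if lines[i].split()[0].upper() != "MACRO":
--             segs.append(("c", lines[i]))
--             i += 1
--             continue
--         i += 1
--         while i < n and lines[i].split()[0].upper() == "MACRO":
--             i += 1
--         if i >= n:
--             break
--         proto = lines[i].split()
--         i += 1
--         body = []
--         mend = False
--         while i < n:
--             parts = lines[i].split()
--             u = parts[0].upper()
--             if u == "MACRO":
--                 break
--             i += 1
--             if u == "MEND":
--                 mend = True
--                 break
--             body.append(parts)
--         segs.append(("m", proto, body, mend))
--     return segs
--
--
-- def _parse_block(proto, body, mend):
--     """Phase 2: one macro block -> (name, params, pp, kp, kpdt entries, mdt lines)."""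
--     name = proto[0]
--     cleaned = [_clean(t) for t in proto[1:]]
--     params = [p.split("=")[0] if "=" in p else p for p in cleaned]
--     kpdt = [(p.split("=")[0], p.split("=")[1]) for p in cleaned if "=" in p]
--     kp = 1 + len(kpdt)
--     pp = 1 + len(cleaned) - len(kpdt)
--     lines = [" ".join("(P,%d)" % (params.index(_clean(t)) + 1) if "&" in t else t
--                       for t in parts) for parts in body]
--     return name, params, pp, kp, kpdt, lines + (["MEND"] if mend else [])
--
--
-- def macro_Pass1(inputlines):
--     segs = _segment([l.strip() for l in inputlines])
--     blocks = [_parse_block(s[1], s[2], s[3]) for s in segs if s[0] == "m"]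
--     ic = [s[1] for s in segs if s[0] == "c"]
--     mdt = [ln for b in blocks for ln in b[5]]
--     kpdt = [e for b in blocks for e in b[4]]
--     pntab = {b[0]: b[1] for b in blocks}
--     mnt = []
--     run = 0
--     for name, _, pp, kp, _, _ in blocks:
--         mnt.append((name, pp, kp, 1, run + 1))  # MDT pointer stays 1: A's 'mdtp+1' never updates it
--         run += kp
--     return mdt, mnt, kpdt, pntab, ic
-- ===== Notes on version B (the rewrite author's own statement) =====
-- stated objective: alternative
-- what changed: Replaces A's single-pass flag state machine by a staged pipeline: phase 1 segments the stripped lines into plain code lines and macro blocks (prototype, body token lists, MEND flag); phase 2 parses each block independently with map/filter comprehensions (params, keyword table, pp/kp as counts) and expands its body; the five tables are then assembled by separate concatenations plus one prefix-sum loop for the running kpdtp, instead of being mutated inside one loop.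
import Mathlib
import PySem

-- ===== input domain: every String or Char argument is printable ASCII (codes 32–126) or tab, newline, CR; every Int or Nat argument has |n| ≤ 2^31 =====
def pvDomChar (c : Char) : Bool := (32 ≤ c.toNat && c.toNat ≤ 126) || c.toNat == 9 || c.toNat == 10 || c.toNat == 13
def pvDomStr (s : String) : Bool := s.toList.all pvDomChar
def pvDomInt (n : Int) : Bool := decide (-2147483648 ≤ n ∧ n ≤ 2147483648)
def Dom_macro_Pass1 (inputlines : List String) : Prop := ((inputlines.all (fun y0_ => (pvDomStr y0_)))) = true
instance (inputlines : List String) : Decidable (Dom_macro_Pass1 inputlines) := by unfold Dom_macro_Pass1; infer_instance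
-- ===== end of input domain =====

-- B replaces A's one-pass flag state machine by a staged pipeline (segment the lines into
-- code lines and macro blocks, parse each block independently, assemble the five tables by
-- concatenation plus one prefix-sum loop); same outputs, same cost ("alternative").

-- ===== PORT A =====
-- A's mutable state: all five result collections plus the scalar bookkeeping variables.
structure AState where
  mdt : List String
  mnt : List (String × Int × Int × Int × Int)
  kpdt : List (String × String)
  pntab : PySem.Dict String (List String)
  ic : List String
  macroname : Option String
  mdtp : Int
  kpdtp : Int
  paramNo : Int
  pp : Int
  kp : Int
  flag : Int
deriving Repr, DecidableEq

def stripPunctA (tok : String) : String :=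
  PySem.Str.replace (PySem.Str.replace tok "&" "") "," ""

-- one iteration of A's 'for i in range(1,len(parts))' prototype loop
-- (the pntab[Macroname].append mutations are accumulated in the first component and
--  written back by one dict insert, at the position 'pntab[Macroname]=[]' established)
def protoStepA (acc : List String × List (String × String) × Int × Int) (tok : String) :
    List String × List (String × String) × Int × Int :=
  let param := stripPunctA tok
  if PySem.Str.isIn "=" param then
    let kwp := (PySem.Str.split? param "=").getD []   -- param.split("="): sep "=" ≠ "", always some
    (acc.1 ++ [kwp.headD ""], acc.2.1 ++ [(kwp.headD "", kwp.getD 1 "-")], acc.2.2.1, acc.2.2.2 + 1)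
  else
    (acc.1 ++ [param], acc.2.1, acc.2.2.1 + 1, acc.2.2.2)

-- one iteration of A's 'for part in parts' body loop; none = ValueError from .index
def substStepA (plist : List String) (acc : Option (List String)) (part : String) :
    Option (List String) :=
  acc.bind fun ml =>
    if PySem.Str.isIn "&" part then
      match PySem.List.index? plist (stripPunctA part) with
      | none => none
      | some k => some (ml ++ ["(P," ++ PySem.Int.toStr ((k : Int) + 1) ++ ")"])
    else some (ml ++ [part])

-- one iteration of A's 'for line in inputlines'; none = the line where A raises
def stepA (s : AState) (line0 : String) : Option AState :=
  let line := PySem.Str.strip line0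
  match PySem.Str.split₀ line with
  | [] => none   -- parts[0] on an all-whitespace line: IndexError
  | p0 :: rest =>
    if PySem.Str.upper p0 = "MACRO" then some { s with flag := 1 }
    else if s.flag = 1 then
      let r := rest.foldl protoStepA ([], s.kpdt, 1, 1)
      some { s with
        macroname := some p0, paramNo := 1,
        pp := r.2.2.1, kp := r.2.2.2,
        pntab := (s.pntab.insert p0 []).insert p0 r.1,
        kpdt := r.2.1,
        mnt := s.mnt ++ [(p0, r.2.2.1, r.2.2.2, s.mdtp,
                          if r.2.2.2 = 0 then s.kpdtp else s.kpdtp + 1)],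
        kpdtp := s.kpdtp + r.2.2.2,
        flag := 2 }
    else if s.flag = 2 then
      if PySem.Str.upper p0 = "MEND" then some { s with mdt := s.mdt ++ ["MEND"], flag := 0 }
      else
        match s.macroname with
        | none => none   -- pntab[None]: KeyError (unreachable from the initial state)
        | some mn =>
          match s.pntab.get? mn with
          | none => none   -- KeyError
          | some plist =>
            match (p0 :: rest).foldl (substStepA plist) (some []) with
            | none => none
            | some ml => some { s with mdt := s.mdt ++ [PySem.Str.join " " ml] }
              -- A's bare 'mdtp+1' statement is a no-op: mdtp is NOT updated
    else some { s with ic := s.ic ++ [line] }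

def initA : AState :=
  { mdt := [], mnt := [], kpdt := [], pntab := PySem.Dict.empty, ic := [],
    macroname := none, mdtp := 1, kpdtp := 0, paramNo := 1, pp := 0, kp := 0, flag := 0 }

def runFrom (lines : List String) (a : AState) : Option AState :=
  lines.foldl (fun acc l => acc.bind fun s => stepA s l) (some a)

def macro_Pass1 (inputlines : List String) :
    List String × (List (String × Int × Int × Int × Int)) × (List (String × String)) ×
      (List (String × List String)) × List String :=
  match runFrom inputlines initA with
  | some s => (s.mdt, s.mnt, s.kpdt, s.pntab.items, s.ic)
  | none => ([], [], [], [], [])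

-- ===== PORT B =====
-- phase-1 result: a plain code line, or a macro block (prototype tokens, body token lists, MEND seen)
inductive Seg where
  | code : String → Seg
  | blk : List String → List (List String) → Bool → Seg
deriving Repr, DecidableEq

def cleanTok (tok : String) : String :=
  PySem.Str.replace (PySem.Str.replace tok "&" "") "," ""

def eqSplit (p : String) : List String :=
  (PySem.Str.split? p "=").getD []   -- p.split("="): sep "=" ≠ "", always some, never []

-- B's per-token body substitution (the generator inside " ".join); none = ValueError
def substTok (params : List String) (t : String) : Option String :=
  if PySem.Str.isIn "&" t then
    (PySem.List.index? params (cleanTok t)).map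
      (fun k => "(P," ++ PySem.Int.toStr ((k : Int) + 1) ++ ")")
  else some t

-- B's _segment: three while loops over the stripped lines; none = IndexError on a blank line
mutual
-- the outer 'while i < n' loop
def segMain : List String → Option (List Seg)
  | [] => some []
  | l :: rest =>
    match PySem.Str.split₀ l with
    | [] => none
    | p0 :: _ =>
      if PySem.Str.upper p0 = "MACRO" then segSkip rest
      else (segMain rest).map (Seg.code l :: ·)
-- the 'while … == "MACRO"' skip loop, then the prototype line
def segSkip : List String → Option (List Seg)
  | [] => some []
  | l :: rest =>
    match PySem.Str.split₀ l with
    | [] => none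
    | p0 :: ptail =>
      if PySem.Str.upper p0 = "MACRO" then segSkip rest
      else segBody rest (p0 :: ptail) []
-- the body 'while i < n' loop: collect token lists until MEND / a fresh MACRO / EOF
def segBody : List String → List String → List (List String) → Option (List Seg)
  | [], proto, acc => some [Seg.blk proto acc false]
  | l :: rest, proto, acc =>
    match PySem.Str.split₀ l with
    | [] => none
    | p0 :: ptail =>
      if PySem.Str.upper p0 = "MACRO" then (segSkip rest).map (Seg.blk proto acc false :: ·)
      else if PySem.Str.upper p0 = "MEND" then (segMain rest).map (Seg.blk proto acc true :: ·)
      else segBody rest proto (acc ++ [p0 :: ptail])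
end

-- B's _parse_block: comprehensions over the prototype tokens and the body; none = ValueError
-- from params.index on an unknown '&'-token (sp[1] of an '='-piece exists whenever '=' occurs)
structure Block where
  name : String
  params : List String
  pp : Int
  kp : Int
  kpdt : List (String × String)
  lines : List String
deriving Repr, DecidableEq

def parseBlock (proto : List String) (body : List (List String)) (mend : Bool) : Option Block :=
  match proto with
  | [] => none   -- proto[0]; unreachable: prototypes come from a nonempty split
  | name :: rest =>
    let cleaned := rest.map cleanTok
    let params := cleaned.map fun p =>
      if PySem.Str.isIn "=" p then (eqSplit p).headD "" else p   -- sp[0]: eqSplit never []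
    match (cleaned.filter (fun p => PySem.Str.isIn "=" p)).mapM
        (fun p => (PySem.List.pyGet? (eqSplit p) 1).map fun v => ((eqSplit p).headD "", v)) with
    | none => none
    | some kpdtE =>
      match body.mapM (fun parts =>
          (parts.mapM (substTok params)).map (PySem.Str.join " ")) with
      | none => none
      | some lns =>
        some { name := name, params := params,
               pp := 1 + (cleaned.length : Int) - (kpdtE.length : Int),
               kp := 1 + (kpdtE.length : Int),
               kpdt := kpdtE,
               lines := lns ++ (if mend then ["MEND"] else []) }

def segCode? : Seg → Option String
  | Seg.code l => some l
  | _ => none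

def segBlk? : Seg → Option (List String × List (List String) × Bool)
  | Seg.blk p b m => some (p, b, m)
  | _ => none

def macro_Pass1_alt (inputlines : List String) :
    List String × (List (String × Int × Int × Int × Int)) × (List (String × String)) ×
      (List (String × List String)) × List String :=
  match segMain (inputlines.map PySem.Str.strip) with
  | none => ([], [], [], [], [])
  | some segs =>
    match (segs.filterMap segBlk?).mapM (fun t => parseBlock t.1 t.2.1 t.2.2) with
    | none => ([], [], [], [], [])
    | some blocks =>
      (blocks.flatMap (·.lines),
       (blocks.foldl (fun (acc : List (String × Int × Int × Int × Int) × Int) b =>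
          (acc.1 ++ [(b.name, b.pp, b.kp, (1 : Int), acc.2 + 1)], acc.2 + b.kp)) ([], 0)).1,
       blocks.flatMap (·.kpdt),
       (blocks.foldl (fun d b => d.insert b.name b.params)
          (PySem.Dict.empty : PySem.Dict String (List String))).items,
       segs.filterMap segCode?)

-- ===== PRECONDITION & SPEC =====
-- Pre_ excludes exactly the inputs where the Python A raises: a line that is empty after
-- strip() (IndexError on parts[0]) and a macro-body '&'-token naming no prototype parameter
-- (ValueError from .index). preOk is a wellformedness grammar over the lines; it computes
-- none of the five outputs.
inductive PreMode where
  | outside : PreMode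
  | proto : PreMode
  | body : List String → PreMode
deriving DecidableEq, Repr

def preName (tok : String) : String :=
  let p := PySem.Str.replace (PySem.Str.replace tok "&" "") "," ""
  if PySem.Str.isIn "=" p then ((PySem.Str.split? p "=").getD []).headD "" else p

def preOk : List String → PreMode → Bool
  | [], _ => true
  | l :: rest, m =>
    match PySem.Str.split₀ (PySem.Str.strip l) with
    | [] => false
    | p0 :: ptail =>
      if PySem.Str.upper p0 = "MACRO" then preOk rest PreMode.proto
      else
        match m with
        | PreMode.outside => preOk rest PreMode.outside
        | PreMode.proto => preOk rest (PreMode.body (ptail.map preName))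
        | PreMode.body ps =>
          (if PySem.Str.upper p0 = "MEND" then preOk rest PreMode.outside
           else
            ((p0 :: ptail).all fun t =>
              !PySem.Str.isIn "&" t ||
                decide ((PySem.Str.replace (PySem.Str.replace t "&" "") "," "") ∈ ps))
            && preOk rest (PreMode.body ps))

def Pre_macro_Pass1 (inputlines : List String) : Prop :=
  preOk inputlines PreMode.outside = true
instance (inputlines : List String) : Decidable (Pre_macro_Pass1 inputlines) := by
  unfold Pre_macro_Pass1; infer_instance

def pvWitness_macro_Pass1 : List String :=
  ["MACRO", "INCR &A, &B=5", "MOVER AREG, &A", "ADD AREG, &B", "MEND", "START"]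

def Spec_macro_Pass1 (inputlines : List String)
    (out : List String × (List (String × Int × Int × Int × Int)) × (List (String × String)) ×
      (List (String × List String)) × List String) : Prop := out = macro_Pass1_alt inputlines
instance (inputlines : List String) (out : List String × (List (String × Int × Int × Int × Int)) × (List (String × String)) × (List (String × List String)) × List String) : Decidable (Spec_macro_Pass1 inputlines out) := by
  unfold Spec_macro_Pass1
  letI h5 : DecidableEq (List String) := inferInstance
  letI h4 : DecidableEq (List (String × List String)) := inferInstance
  letI h3 : DecidableEq (List (String × String)) := inferInstance
  letI h2 : DecidableEq (List (String × Int × Int × Int × Int)) := inferInstance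
  exact @instDecidableEqProd _ _ h5
    (@instDecidableEqProd _ _ h2 (@instDecidableEqProd _ _ h3 (@instDecidableEqProd _ _ h4 h5))) _ _

-- ===== CLAIM (what is proved, stated in full; the proofs are below) =====
def Claim_equal_macro_Pass1 : Prop := ∀ (inputlines : List String), Dom_macro_Pass1 inputlines → Pre_macro_Pass1 inputlines → Spec_macro_Pass1 inputlines (macro_Pass1 inputlines)

-- ===== LEMMAS AND PROOFS =====

-- common view of the outputs: the five tables plus the running kpdtp
structure PState where
  mdt : List String
  mnt : List (String × Int × Int × Int × Int)
  kpdt : List (String × String)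
  pntab : PySem.Dict String (List String)
  ic : List String
  kpdtp : Int
deriving Repr, DecidableEq

def bview (a : AState) : PState := ⟨a.mdt, a.mnt, a.kpdt, a.pntab, a.ic, a.kpdtp⟩

-- sequential processing of the segment list (the glue between A's run and B's assembly)
def procStep (st : PState) : Seg → Option PState
  | Seg.code l => some { st with ic := st.ic ++ [l] }
  | Seg.blk p b m => (parseBlock p b m).map fun bl =>
      ⟨st.mdt ++ bl.lines,
       st.mnt ++ [(bl.name, bl.pp, bl.kp, 1, st.kpdtp + 1)],
       st.kpdt ++ bl.kpdt,
       st.pntab.insert bl.name bl.params,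
       st.ic,
       st.kpdtp + bl.kp⟩

def procList (st : PState) : List Seg → Option PState
  | [] => some st
  | s :: rest => (procStep st s).bind fun st' => procList st' rest

-- recursive characterisations of the prototype parse
def kwTest (t : String) : Bool := PySem.Chars.isIn ['='] (stripPunctA t).toList

def pnames : List String → List String
  | [] => []
  | t :: ts =>
    (if kwTest t then (eqSplit (stripPunctA t)).headD "" else stripPunctA t) :: pnames ts

def kentries : List String → List (String × String)
  | [] => []
  | t :: ts =>
    if kwTest t then
      ((eqSplit (stripPunctA t)).headD "", (eqSplit (stripPunctA t)).getD 1 "-") :: kentries ts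
    else kentries ts

def nkwc : List String → Nat
  | [] => 0
  | t :: ts => (if kwTest t then 1 else 0) + nkwc ts

def nposc : List String → Nat
  | [] => 0
  | t :: ts => (if kwTest t then 0 else 1) + nposc ts

-- Option-valued map with explicit structural equations (List.mapM for Option)
def optMap {α β : Type} (f : α → Option β) : List α → Option (List β)
  | [] => some []
  | x :: xs => (f x).bind fun b => (optMap f xs).map fun bs => b :: bs

theorem mapM_eq_optMap {α β : Type} (f : α → Option β) : ∀ l : List α, l.mapM f = optMap f l := by
  intro l
  induction l with
  | nil => simp [optMap]
  | cons x xs ih =>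
    rw [List.mapM_cons, ih]
    cases hf : f x <;> cases ho : optMap f xs <;> simp [optMap, hf, ho]

theorem optMap_snoc {α β : Type} (f : α → Option β) (l : List α) (x : α) :
    optMap f (l ++ [x]) = (optMap f l).bind fun a => (f x).map fun b => a ++ [b] := by
  induction l with
  | nil => cases hf : f x <;> simp [optMap, hf]
  | cons y ys ih =>
    cases hf : f y <;> simp [optMap, hf, ih] <;>
      cases hys : optMap f ys <;> cases hx : f x <;> simp

-- splitOn produces at least two pieces when the separator occurs
theorem go_len (sep : List Char) (fuel : Nat) :
    ∀ (l cur : List Char) (acc : List (List Char)),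
      acc.length + 1 ≤ (PySem.Chars.splitOn.go sep fuel l cur acc).length := by
  induction fuel with
  | zero => intro l cur acc; simp [PySem.Chars.splitOn.go]
  | succ n ih =>
    intro l cur acc
    cases l with
    | nil => simp [PySem.Chars.splitOn.go]
    | cons c rest =>
      rw [PySem.Chars.splitOn.go]
      split
      · have h1 := ih (List.drop sep.length (c :: rest)) [] (cur.reverse :: acc)
        simp at h1 ⊢
        omega
      · exact ih _ _ _

theorem go_two (sep : List Char) (hsep : sep ≠ []) (fuel : Nat) :
    ∀ (l cur : List Char) (acc : List (List Char)), l.length < fuel →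
      (∃ j, sep <+: l.drop j) →
      acc.length + 2 ≤ (PySem.Chars.splitOn.go sep fuel l cur acc).length := by
  induction fuel with
  | zero => intro l cur acc h; omega
  | succ n ih =>
    intro l cur acc hlen hex
    cases l with
    | nil =>
      obtain ⟨j, hj⟩ := hex
      simp at hj
      exact absurd hj hsep
    | cons c rest =>
      rw [PySem.Chars.splitOn.go]
      split
      · have := go_len sep n (List.drop sep.length (c :: rest)) [] (cur.reverse :: acc)
        simp at this ⊢
        omega
      · rename_i hpre
        apply ih rest (c :: cur) acc (by simp at hlen ⊢; omega)
        obtain ⟨j, hj⟩ := hex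
        cases j with
        | zero =>
          simp at hj
          exact absurd ((List.isPrefixOf_iff_prefix).2 hj) (by simpa using hpre)
        | succ j' => exact ⟨j', by simpa using hj⟩

theorem splitOn_two (s sep : List Char) (hsep : sep ≠ [])
    (h : PySem.Chars.isIn sep s = true) : 2 ≤ (PySem.Chars.splitOn s sep).length := by
  have := go_two sep hsep (s.length + 1) s [] [] (by omega)
    ((PySem.Chars.exists_prefix_drop_iff_isIn sep s).2 h)
  simpa [PySem.Chars.splitOn] using this

theorem split2 (p : String) (h : PySem.Str.isIn "=" p = true) :
    ∃ k v r, eqSplit p = k :: v :: r := by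
  have h2 : 2 ≤ (PySem.Chars.splitOn p.toList ['=']).length := by
    apply splitOn_two _ _ (by simp)
    simpa using h
  have hs : eqSplit p = (PySem.Chars.splitOn p.toList ['=']).map String.ofList := by
    simp [eqSplit, PySem.Str.split?, PySem.Chars.split?]
  rw [hs]
  cases hsp : PySem.Chars.splitOn p.toList ['='] with
  | nil => rw [hsp] at h2; simp at h2
  | cons a t =>
    cases t with
    | nil => rw [hsp] at h2; simp at h2
    | cons b t' => exact ⟨_, _, _, rfl⟩

-- A's prototype fold computes the recursive characterisation
theorem protoStepA_kw (acc : List String × List (String × String) × Int × Int) (t : String)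
    (h : kwTest t = true) :
    protoStepA acc t
      = (acc.1 ++ [(eqSplit (stripPunctA t)).headD ""],
         acc.2.1 ++ [((eqSplit (stripPunctA t)).headD "", (eqSplit (stripPunctA t)).getD 1 "-")],
         acc.2.2.1, acc.2.2.2 + 1) := by
  have h' := h
  unfold kwTest at h'
  simp [protoStepA, eqSplit, PySem.Str.isIn, h']

theorem protoStepA_pos (acc : List String × List (String × String) × Int × Int) (t : String)
    (h : ¬ kwTest t = true) :
    protoStepA acc t = (acc.1 ++ [stripPunctA t], acc.2.1, acc.2.2.1 + 1, acc.2.2.2) := by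
  have h' : PySem.Chars.isIn ['='] (stripPunctA t).toList = false := by
    unfold kwTest at h; simpa using h
  simp [protoStepA, PySem.Str.isIn, h']

theorem foldA_char (toks : List String) : ∀ (ps : List String) (kd : List (String × String)) (p k : Int),
    toks.foldl protoStepA (ps, kd, p, k)
      = (ps ++ pnames toks, kd ++ kentries toks, p + (nposc toks : Int), k + (nkwc toks : Int)) := by
  induction toks with
  | nil => intro ps kd p k; simp [pnames, kentries, nposc, nkwc]
  | cons t ts ih =>
    intro ps kd p k
    rw [List.foldl_cons]
    by_cases h : kwTest t = true
    · rw [protoStepA_kw _ _ h, ih]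
      simp only [pnames, kentries, nposc, nkwc, h, if_true, Prod.mk.injEq]
      refine ⟨by simp, by simp, by push_cast; ring, by push_cast; ring⟩
    · rw [protoStepA_pos _ _ h, ih]
      simp only [pnames, kentries, nposc, nkwc, h, Prod.mk.injEq]
      refine ⟨by simp, by simp, by push_cast; ring, by push_cast; ring⟩

theorem strIsIn_kw (t : String) : PySem.Str.isIn "=" (stripPunctA t) = kwTest t := rfl

theorem pnames_eq (toks : List String) :
    (toks.map cleanTok).map (fun p => if PySem.Str.isIn "=" p then (eqSplit p).headD "" else p)
      = pnames toks := by
  induction toks with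
  | nil => simp [pnames]
  | cons t ts ih =>
    show (if PySem.Str.isIn "=" (stripPunctA t) then (eqSplit (stripPunctA t)).headD ""
          else stripPunctA t) :: _ = _
    rw [strIsIn_kw, pnames]
    exact congrArg (List.cons _) ih

theorem kentries_eq (toks : List String) :
    optMap (fun p => (PySem.List.pyGet? (eqSplit p) 1).map fun v => ((eqSplit p).headD "", v))
        ((toks.map cleanTok).filter (fun p => PySem.Str.isIn "=" p))
      = some (kentries toks) := by
  induction toks with
  | nil => simp [optMap, kentries]
  | cons t ts ih =>
    show optMap _ (List.filter _ (stripPunctA t :: ts.map cleanTok)) = _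
    rw [List.filter_cons]
    by_cases h : kwTest t = true
    · rw [if_pos (by rw [strIsIn_kw]; exact h)]
      obtain ⟨k, v, r, hkv⟩ := split2 (stripPunctA t) (by rw [strIsIn_kw]; exact h)
      have hget : PySem.List.pyGet? (k :: v :: r) (1 : Int) = some v := by
        simp [PySem.List.pyGet?, PySem.List.pyIdx?]
      rw [optMap, hkv, hget]
      rw [show kentries (t :: ts)
          = ((eqSplit (stripPunctA t)).headD "", (eqSplit (stripPunctA t)).getD 1 "-")
              :: kentries ts from by simp [kentries, h]]
      rw [ih]
      simp [hkv]
    · rw [if_neg (by rw [strIsIn_kw]; exact h)]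
      rw [show kentries (t :: ts) = kentries ts from by simp [kentries, h]]
      exact ih

theorem kentries_len (toks : List String) : (kentries toks).length = nkwc toks := by
  induction toks with
  | nil => rfl
  | cons t ts ih =>
    by_cases h : kwTest t = true <;> simp [kentries, nkwc, h, ih] <;> omega

theorem npos_add (toks : List String) : nposc toks + nkwc toks = toks.length := by
  induction toks with
  | nil => rfl
  | cons t ts ih =>
    by_cases h : kwTest t = true <;> simp [nposc, nkwc, h] <;> omega

-- the block parser, characterised
def expandLine (params : List String) (parts : List String) : Option String :=
  (optMap (substTok params) parts).map (PySem.Str.join " ")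

theorem parseBlock_char (p0 : String) (toks : List String) (body : List (List String)) (m : Bool) :
    parseBlock (p0 :: toks) body m
      = (optMap (expandLine (pnames toks)) body).map
          (fun lns => ⟨p0, pnames toks, 1 + (nposc toks : Int), 1 + (nkwc toks : Int), kentries toks,
                       lns ++ (if m then ["MEND"] else [])⟩) := by
  simp only [parseBlock, mapM_eq_optMap, pnames_eq, kentries_eq]
  have hf : (fun parts => (optMap (substTok (pnames toks)) parts).map (PySem.Str.join " "))
      = expandLine (pnames toks) := rfl
  rw [hf]
  cases hB : optMap (expandLine (pnames toks)) body with
  | none => simp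
  | some lns =>
    simp only [Option.map_some]
    have hlen : ((toks.length : Nat) : Int) = (nposc toks : Int) + (nkwc toks : Int) := by
      exact_mod_cast (npos_add toks).symm
    simp [kentries_len, hlen]
    omega

theorem parse_nonempty {proto : List String} {acc : List (List String)} {m : Bool} {bl : Block}
    (h : parseBlock proto acc m = some bl) : ∃ p0 toks, proto = p0 :: toks := by
  cases proto with
  | nil => simp [parseBlock] at h
  | cons p0 toks => exact ⟨p0, toks, rfl⟩

theorem parse_fields {p0 : String} {toks : List String} {acc : List (List String)} {bl : Block}
    (h : parseBlock (p0 :: toks) acc false = some bl) :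
    ∃ lns, optMap (expandLine (pnames toks)) acc = some lns ∧
      bl = ⟨p0, pnames toks, 1 + (nposc toks : Int), 1 + (nkwc toks : Int), kentries toks, lns⟩ := by
  rw [parseBlock_char] at h
  cases hB : optMap (expandLine (pnames toks)) acc with
  | none => rw [hB] at h; simp at h
  | some lns =>
    rw [hB] at h
    simp at h
    exact ⟨lns, rfl, by simp [← h]⟩

theorem parse_mend {proto : List String} {acc : List (List String)} {bl : Block}
    (h : parseBlock proto acc false = some bl) :
    parseBlock proto acc true = some { bl with lines := bl.lines ++ ["MEND"] } := by
  obtain ⟨p0, toks, rfl⟩ := parse_nonempty h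
  obtain ⟨lns, hB, rfl⟩ := parse_fields h
  rw [parseBlock_char, hB]
  simp

theorem parse_snoc {proto : List String} {acc : List (List String)} {bl : Block}
    {parts : List String} {ml : List String}
    (h : parseBlock proto acc false = some bl)
    (hml : optMap (substTok bl.params) parts = some ml) :
    parseBlock proto (acc ++ [parts]) false
      = some { bl with lines := bl.lines ++ [PySem.Str.join " " ml] } := by
  obtain ⟨p0, toks, rfl⟩ := parse_nonempty h
  obtain ⟨lns, hB, rfl⟩ := parse_fields h
  simp only at hml
  rw [parseBlock_char, optMap_snoc, hB]
  simp [expandLine, hml]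

theorem parse_snoc_none {proto : List String} {acc : List (List String)} {bl : Block}
    {parts : List String}
    (h : parseBlock proto acc false = some bl)
    (hml : optMap (substTok bl.params) parts = none) :
    parseBlock proto (acc ++ [parts]) false = none := by
  obtain ⟨p0, toks, rfl⟩ := parse_nonempty h
  obtain ⟨lns, hB, rfl⟩ := parse_fields h
  simp only at hml
  rw [parseBlock_char, optMap_snoc, hB]
  simp [expandLine, hml]

theorem parse_none_snoc {proto : List String} {acc : List (List String)} {parts : List String}
    (h : parseBlock proto acc false = none) :
    parseBlock proto (acc ++ [parts]) false = none := by
  cases proto with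
  | nil => simp [parseBlock]
  | cons p0 toks =>
    rw [parseBlock_char] at h ⊢
    rw [optMap_snoc]
    cases hB : optMap (expandLine (pnames toks)) acc with
    | none => simp
    | some lns => rw [hB] at h; simp at h

theorem parse_none_mend {proto : List String} {acc : List (List String)}
    (h : parseBlock proto acc false = none) :
    parseBlock proto acc true = none := by
  cases proto with
  | nil => simp [parseBlock]
  | cons p0 toks =>
    rw [parseBlock_char] at h ⊢
    cases hB : optMap (expandLine (pnames toks)) acc with
    | none => simp
    | some lns => rw [hB] at h; simp at h

-- a failed block parse poisons the whole body continuation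
theorem segBody_fail (lines : List String) : ∀ (proto : List String) (acc : List (List String))
    (st : PState), parseBlock proto acc false = none →
    (segBody lines proto acc).bind (fun t => procList st t) = none := by
  induction lines with
  | nil =>
    intro proto acc st h
    simp [segBody, procList, procStep, h]
  | cons l rest ih =>
    intro proto acc st h
    rw [segBody]
    cases hsp : PySem.Str.split₀ l with
    | nil => simp
    | cons p0 ptail =>
      by_cases hM : PySem.Str.upper p0 = "MACRO"
      · simp only [hM, if_true]
        cases hs : segSkip rest with
        | none => simp
        | some t => simp [hs, procList, procStep, h]
      · by_cases hE : PySem.Str.upper p0 = "MEND"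
        · simp only [hM, if_false, hE, if_true]
          cases hs : segMain rest with
          | none => simp
          | some t => simp [hs, procList, procStep, parse_none_mend h]
        · simp only [hM, if_false, hE]
          exact ih proto (acc ++ [p0 :: ptail]) st (parse_none_snoc h)

-- A's body substitution fold vs B's per-token expansion
theorem substA_none (plist : List String) (parts : List String) :
    parts.foldl (substStepA plist) none = none := by
  induction parts with
  | nil => rfl
  | cons p ps ih => rw [List.foldl_cons]; simpa [substStepA] using ih

theorem substStep_some (plist : List String) (acc : List String) (p : String) :
    substStepA plist (some acc) p = (substTok plist p).map (fun x => acc ++ [x]) := by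
  unfold substStepA substTok
  rw [show cleanTok = stripPunctA from rfl]
  dsimp only [Option.bind]
  by_cases h : PySem.Str.isIn "&" p = true
  · rw [if_pos h, if_pos h]
    cases hidx : PySem.List.index? plist (stripPunctA p) <;> rfl
  · rw [if_neg h, if_neg h]; rfl

theorem subst_eq (plist : List String) (parts : List String) :
    ∀ acc, parts.foldl (substStepA plist) (some acc)
      = (optMap (substTok plist) parts).map (acc ++ ·) := by
  induction parts with
  | nil => intro acc; simp [optMap]
  | cons p ps ih =>
    intro acc
    rw [List.foldl_cons, substStep_some]
    cases ht : substTok plist p with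
    | none => simp [optMap, ht, substA_none]
    | some x =>
      simp only [ht, Option.map_some]
      rw [ih (acc ++ [x])]
      cases hps : optMap (substTok plist) ps <;> simp [optMap, hps, ht]

-- B's mnt prefix-sum loop, characterised
def mntFrom (k : Int) : List Block → List (String × Int × Int × Int × Int)
  | [] => []
  | b :: bs => (b.name, b.pp, b.kp, 1, k + 1) :: mntFrom (k + b.kp) bs

theorem mnt_fold (blocks : List Block) :
    ∀ (acc : List (String × Int × Int × Int × Int)) (k : Int),
    (blocks.foldl (fun (acc : List (String × Int × Int × Int × Int) × Int) b =>
        (acc.1 ++ [(b.name, b.pp, b.kp, (1 : Int), acc.2 + 1)], acc.2 + b.kp)) (acc, k)).1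
      = acc ++ mntFrom k blocks := by
  induction blocks with
  | nil => intro acc k; simp [mntFrom]
  | cons b bs ih => intro acc k; rw [List.foldl_cons, ih]; simp [mntFrom]

-- B's table assembly, characterised as sequential segment processing
def buildFrom (st : PState) (cs : List String) (blocks : List Block) : PState :=
  ⟨st.mdt ++ blocks.flatMap (·.lines),
   st.mnt ++ mntFrom st.kpdtp blocks,
   st.kpdt ++ blocks.flatMap (·.kpdt),
   blocks.foldl (fun d b => d.insert b.name b.params) st.pntab,
   st.ic ++ cs,
   st.kpdtp + (blocks.map (·.kp)).sum⟩

theorem assemble (segs : List Seg) : ∀ (st : PState),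
    procList st segs
      = (optMap (fun t => parseBlock t.1 t.2.1 t.2.2) (segs.filterMap segBlk?)).map
          (buildFrom st (segs.filterMap segCode?)) := by
  induction segs with
  | nil => intro st; simp [procList, optMap, buildFrom, mntFrom]
  | cons s rest ih =>
    intro st
    cases s with
    | code l =>
      have h1 : procList st (Seg.code l :: rest)
          = procList { st with ic := st.ic ++ [l] } rest := rfl
      have h2 : (Seg.code l :: rest).filterMap segBlk? = rest.filterMap segBlk? := by
        simp [segBlk?]
      have h3 : (Seg.code l :: rest).filterMap segCode? = l :: rest.filterMap segCode? := by
        simp [segCode?]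
      rw [h1, h2, h3, ih]
      cases hO : optMap (fun t => parseBlock t.1 t.2.1 t.2.2) (rest.filterMap segBlk?) with
      | none => rfl
      | some blocks => simp [buildFrom]
    | blk p b m =>
      have h1 : procList st (Seg.blk p b m :: rest)
          = (procStep st (Seg.blk p b m)).bind fun st' => procList st' rest := rfl
      have h2 : (Seg.blk p b m :: rest).filterMap segBlk? = (p, b, m) :: rest.filterMap segBlk? := by
        simp [segBlk?]
      have h3 : (Seg.blk p b m :: rest).filterMap segCode? = rest.filterMap segCode? := by
        simp [segCode?]
      rw [h1, h2, h3]
      rw [show optMap (fun t => parseBlock t.1 t.2.1 t.2.2) ((p, b, m) :: rest.filterMap segBlk?)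
            = (parseBlock p b m).bind fun bl' =>
                (optMap (fun t => parseBlock t.1 t.2.1 t.2.2) (rest.filterMap segBlk?)).map
                  (bl' :: ·) from rfl]
      cases hp : parseBlock p b m with
      | none => simp [procStep, hp]
      | some bl =>
        rw [show procStep st (Seg.blk p b m) = (parseBlock p b m).map (fun bl =>
            (⟨st.mdt ++ bl.lines, st.mnt ++ [(bl.name, bl.pp, bl.kp, 1, st.kpdtp + 1)],
              st.kpdt ++ bl.kpdt, st.pntab.insert bl.name bl.params, st.ic,
              st.kpdtp + bl.kp⟩ : PState)) from rfl, hp]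
        simp only [Option.map_some, Option.bind_some]
        rw [ih]
        cases hO : optMap (fun t => parseBlock t.1 t.2.1 t.2.2) (rest.filterMap segBlk?) with
        | none => rfl
        | some blocks => simp [buildFrom, mntFrom, add_assoc]

theorem runFrom_none (lines : List String) :
    lines.foldl (fun acc l => acc.bind fun s => stepA s l) none = none := by
  induction lines with
  | nil => rfl
  | cons l rest ih => simpa using ih

-- the main induction: A's run equals segmentation followed by sequential block processing
set_option maxHeartbeats 3000000 in
theorem main_lemma (lines : List String) : ∀ (a : AState), a.mdtp = 1 →
    ((a.flag ≠ 1 ∧ a.flag ≠ 2) →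
      (runFrom lines a).map bview
        = (segMain (lines.map PySem.Str.strip)).bind fun t => procList (bview a) t)
    ∧ (a.flag = 1 →
      (runFrom lines a).map bview
        = (segSkip (lines.map PySem.Str.strip)).bind fun t => procList (bview a) t)
    ∧ (a.flag = 2 → ∀ (st₀ : PState) (proto : List String) (acc : List (List String)) (bl : Block),
        parseBlock proto acc false = some bl →
        a.macroname = some bl.name →
        a.pntab.get? bl.name = some bl.params →
        procStep st₀ (Seg.blk proto acc false) = some (bview a) →
        (runFrom lines a).map bview
          = (segBody (lines.map PySem.Str.strip) proto acc).bind fun t => procList st₀ t) := by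
  induction lines with
  | nil =>
    intro a _
    refine ⟨fun _ => ?_, fun _ => ?_, fun _ st₀ proto acc bl hpar hmn hget hps => ?_⟩
    · simp [runFrom, segMain, procList]
    · simp [runFrom, segSkip, procList]
    · simp [runFrom, segBody, procList, hps]
  | cons l rest ih =>
    intro a ha
    have hstep_run : ∀ (s' : AState), stepA a l = some s' →
        runFrom (l :: rest) a = runFrom rest s' := by
      intro s' h; simp [runFrom, h]
    have hstep_none : stepA a l = none → runFrom (l :: rest) a = none := by
      intro h; simp [runFrom, h, runFrom_none]
    have hmap : (l :: rest).map PySem.Str.strip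
        = PySem.Str.strip l :: rest.map PySem.Str.strip := rfl
    rcases hsp : PySem.Str.split₀ (PySem.Str.strip l) with _ | ⟨p0, rest0⟩
    · have hn : stepA a l = none := by simp [stepA, hsp]
      refine ⟨fun _ => ?_, fun _ => ?_, fun _ st₀ proto acc bl _ _ _ _ => ?_⟩ <;>
        rw [hstep_none hn] <;> simp [segMain, segSkip, segBody, hmap, hsp]
    · by_cases hM : PySem.Str.upper p0 = "MACRO"
      · have hs1 : stepA a l = some { a with flag := 1 } := by
          simp [stepA, hsp, hM]
        have h2 := (ih { a with flag := 1 } (by simpa using ha)).2.1 rfl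
        have hbv : bview { a with flag := 1 } = bview a := rfl
        rw [hbv] at h2
        refine ⟨fun _ => ?_, fun _ => ?_, fun _ st₀ proto acc bl hpar hmn hget hps => ?_⟩
        · rw [hstep_run _ hs1, h2]
          simp [segMain, hmap, hsp, hM]
        · rw [hstep_run _ hs1, h2]
          simp [segSkip, hmap, hsp, hM]
        · rw [hstep_run _ hs1, h2]
          simp only [hmap, segBody, hsp, hM, if_true]
          cases hss : segSkip (rest.map PySem.Str.strip) with
          | none => simp
          | some t => simp [hss, procList, hps]
      · refine ⟨?_, ?_, ?_⟩
        · rintro ⟨hf1, hf2⟩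
          have hs0 : stepA a l = some { a with ic := a.ic ++ [PySem.Str.strip l] } := by
            simp [stepA, hsp, hM, hf1, hf2]
          rw [hstep_run _ hs0]
          have h1 := (ih { a with ic := a.ic ++ [PySem.Str.strip l] }
            (by simpa using ha)).1 ⟨hf1, hf2⟩
          rw [h1]
          simp only [hmap, segMain, hsp, hM, if_false]
          cases hsm : segMain (rest.map PySem.Str.strip) with
          | none => simp
          | some t => simp [hsm, procList, procStep, bview]
        · intro hf1
          have hr := foldA_char rest0 [] a.kpdt 1 1
          have hkp : ¬ ((1 : Int) + (nkwc rest0 : Int) = 0) := by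
            have : (0 : Int) ≤ (nkwc rest0 : Int) := Int.natCast_nonneg _
            omega
          have hs1 : stepA a l = some { a with
              macroname := some p0, paramNo := 1,
              pp := 1 + (nposc rest0 : Int), kp := 1 + (nkwc rest0 : Int),
              pntab := (a.pntab.insert p0 []).insert p0 (pnames rest0),
              kpdt := a.kpdt ++ kentries rest0,
              mnt := a.mnt ++ [(p0, 1 + (nposc rest0 : Int), 1 + (nkwc rest0 : Int), a.mdtp,
                               a.kpdtp + 1)],
              kpdtp := a.kpdtp + (1 + (nkwc rest0 : Int)), flag := 2 } := by
            simp [stepA, hsp, hM, hf1, hr, hkp]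
          set a' : AState := { a with
              macroname := some p0, paramNo := 1,
              pp := 1 + (nposc rest0 : Int), kp := 1 + (nkwc rest0 : Int),
              pntab := (a.pntab.insert p0 []).insert p0 (pnames rest0),
              kpdt := a.kpdt ++ kentries rest0,
              mnt := a.mnt ++ [(p0, 1 + (nposc rest0 : Int), 1 + (nkwc rest0 : Int), a.mdtp,
                               a.kpdtp + 1)],
              kpdtp := a.kpdtp + (1 + (nkwc rest0 : Int)), flag := 2 } with ha'
          have hbl : parseBlock (p0 :: rest0) [] false
              = some ⟨p0, pnames rest0, 1 + (nposc rest0 : Int), 1 + (nkwc rest0 : Int),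
                      kentries rest0, []⟩ := by
            rw [parseBlock_char]
            simp [optMap]
          have hget' : a'.pntab.get? p0 = some (pnames rest0) := by
            simp [ha', PySem.Dict.get?_insert_self]
          have hps' : procStep (bview a) (Seg.blk (p0 :: rest0) [] false) = some (bview a') := by
            simp [procStep, hbl, bview, ha', PySem.Dict.insert_insert_self, ha]
          have h3 := (ih a' (by simpa [ha'] using ha)).2.2 rfl (bview a) (p0 :: rest0) [] _
            hbl rfl hget' hps'
          rw [hstep_run _ hs1, h3]
          simp [segSkip, hmap, hsp, hM]
        · intro hf2 st₀ proto acc bl hpar hmn hget hps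
          have hf1' : ¬ (a.flag = 1) := by omega
          simp only [procStep, hpar, Option.map_some, Option.some.injEq] at hps
          have e1 : st₀.mdt ++ bl.lines = a.mdt := by
            have := congrArg PState.mdt hps; simpa [bview] using this
          have e2 : st₀.mnt ++ [(bl.name, bl.pp, bl.kp, 1, st₀.kpdtp + 1)] = a.mnt := by
            have := congrArg PState.mnt hps; simpa [bview] using this
          have e3 : st₀.kpdt ++ bl.kpdt = a.kpdt := by
            have := congrArg PState.kpdt hps; simpa [bview] using this
          have e4 : st₀.pntab.insert bl.name bl.params = a.pntab := by
            have := congrArg PState.pntab hps; simpa [bview] using this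
          have e5 : st₀.ic = a.ic := by
            have := congrArg PState.ic hps; simpa [bview] using this
          have e6 : st₀.kpdtp + bl.kp = a.kpdtp := by
            have := congrArg PState.kpdtp hps; simpa [bview] using this
          by_cases hE : PySem.Str.upper p0 = "MEND"
          · have hs1 : stepA a l = some { a with mdt := a.mdt ++ ["MEND"], flag := 0 } := by
              simp [stepA, hsp, hM, hf1', hf2, hE]
            have hps2 : procStep st₀ (Seg.blk proto acc true)
                = some (bview { a with mdt := a.mdt ++ ["MEND"], flag := 0 }) := by
              simp only [procStep, parse_mend hpar, Option.map_some, Option.some.injEq]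
              rw [show bview { a with mdt := a.mdt ++ ["MEND"], flag := 0 }
                    = (⟨a.mdt ++ ["MEND"], a.mnt, a.kpdt, a.pntab, a.ic, a.kpdtp⟩ : PState) from rfl]
              rw [← e1, ← e2, ← e3, ← e4, ← e5, ← e6]
              simp
            have h1 := (ih { a with mdt := a.mdt ++ ["MEND"], flag := 0 }
              (by simpa using ha)).1 (by simp)
            rw [hstep_run _ hs1, h1]
            simp only [hmap, segBody, hsp, hM, hE, if_true, if_false]
            cases hsm : segMain (rest.map PySem.Str.strip) with
            | none => simp
            | some t => simp [hsm, procList, hps2]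
          · have hsub := subst_eq bl.params (p0 :: rest0) []
            cases hml : optMap (substTok bl.params) (p0 :: rest0) with
            | none =>
              have hs1 : stepA a l = none := by
                simp [stepA, hsp, hM, hf1', hf2, hE, hmn, hget, hsub, hml]
              rw [hstep_none hs1]
              simp only [hmap, segBody, hsp, hM, hE, if_false]
              exact (segBody_fail _ _ _ _ (parse_snoc_none hpar hml)).symm
            | some ml =>
              have hs1 : stepA a l = some { a with
                  mdt := a.mdt ++ [PySem.Str.join " " ml] } := by
                simp [stepA, hsp, hM, hf1', hf2, hE, hmn, hget, hsub, hml]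
              have hpar' := parse_snoc hpar hml
              have hps2 : procStep st₀ (Seg.blk proto (acc ++ [p0 :: rest0]) false)
                  = some (bview { a with mdt := a.mdt ++ [PySem.Str.join " " ml] }) := by
                simp only [procStep, hpar', Option.map_some, Option.some.injEq]
                rw [show bview { a with mdt := a.mdt ++ [PySem.Str.join " " ml] }
                      = (⟨a.mdt ++ [PySem.Str.join " " ml], a.mnt, a.kpdt, a.pntab,
                         a.ic, a.kpdtp⟩ : PState) from rfl]
                rw [← e1, ← e2, ← e3, ← e4, ← e5, ← e6]
                simp
              have h3 := (ih { a with mdt := a.mdt ++ [PySem.Str.join " " ml] }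
                (by simpa using ha)).2.2 hf2 st₀ proto (acc ++ [p0 :: rest0]) _
                hpar' (by simpa using hmn) (by simpa using hget) hps2
              rw [hstep_run _ hs1, h3]
              simp [segBody, hmap, hsp, hM, hE]

-- ===== VERDICT (by name: the statement is the Claim_ definition above) =====
theorem macro_Pass1_spec : Claim_equal_macro_Pass1 := by
  unfold Claim_equal_macro_Pass1
  intro lines _ _
  unfold Spec_macro_Pass1 macro_Pass1 macro_Pass1_alt
  have h := (main_lemma lines initA rfl).1 (by simp [initA])
  cases hm : segMain (lines.map PySem.Str.strip) with
  | none =>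
    rw [hm] at h
    simp at h
    rw [h]
  | some segs =>
    rw [hm] at h
    rw [show ((some segs).bind fun t => procList (bview initA) t)
          = procList (bview initA) segs from rfl] at h
    rw [assemble] at h
    simp only [mapM_eq_optMap]
    cases hp : optMap (fun t => parseBlock t.1 t.2.1 t.2.2) (segs.filterMap segBlk?) with
    | none =>
      rw [hp] at h
      simp only [Option.map_none] at h
      have : runFrom lines initA = none := by
        cases hr : runFrom lines initA with
        | none => rfl
        | some s => rw [hr] at h; simp at h
      rw [this]
    | some blocks =>
      rw [hp] at h
      simp only [Option.map_some] at h
      cases hr : runFrom lines initA with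
      | none => rw [hr] at h; simp at h
      | some s =>
        rw [hr] at h
        simp only [Option.map_some, Option.some.injEq] at h
        have hb : bview s = buildFrom (bview initA) (segs.filterMap segCode?) blocks := h
        have h1 : s.mdt = blocks.flatMap (·.lines) := by
          have := congrArg PState.mdt hb; simpa [bview, buildFrom, initA] using this
        have h2 : s.mnt = mntFrom 0 blocks := by
          have := congrArg PState.mnt hb; simpa [bview, buildFrom, initA] using this
        have h3 : s.kpdt = blocks.flatMap (·.kpdt) := by
          have := congrArg PState.kpdt hb; simpa [bview, buildFrom, initA] using this
        have h4 : s.pntab = blocks.foldl (fun d b => d.insert b.name b.params) PySem.Dict.empty := by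
          have := congrArg PState.pntab hb; simpa [bview, buildFrom, initA] using this
        have h5 : s.ic = segs.filterMap segCode? := by
          have := congrArg PState.ic hb; simpa [bview, buildFrom, initA] using this
        dsimp only
        rw [h1, h2, h3, h4, h5, mnt_fold]
        simp
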